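-- pv_equiv track=rewrite | github.com/marhcouto/feup-cpd-proj | assign1/src/main.py | OnMultBlock
-- ===== SOURCE A (Python) =====
-- def OnMultBlock(n):
--
--     m1 = list()
--     m2 = list()
--     res = list()
--
--     for i in range(0, n):
--         m1.append([1] * n)
--         m2.append([i + 1] * n)
--         res.append([0] * n)
--
--     for i in range(0, n):
--         for k in range(0, n):
--             for j in range(0, n):
--                 res[i][j] += m1[i][k] * m2[k][j]
--
--     return res
-- ===== SOURCE B (Python) =====
-- def OnMultBlock(n):
--     s = n * (n + 1) // 2
--     return [[s] * n for _ in range(n)]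
-- ===== Notes on version B (the rewrite author's own statement) =====
-- stated objective: faster
-- what changed: Replaced the cubic triple-loop block multiplication of the all-ones matrix with the per-row-constant matrix by the closed form: every cell equals the sum of the first n positive integers, so B just fills a constant n-by-n matrix.
import Mathlib
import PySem

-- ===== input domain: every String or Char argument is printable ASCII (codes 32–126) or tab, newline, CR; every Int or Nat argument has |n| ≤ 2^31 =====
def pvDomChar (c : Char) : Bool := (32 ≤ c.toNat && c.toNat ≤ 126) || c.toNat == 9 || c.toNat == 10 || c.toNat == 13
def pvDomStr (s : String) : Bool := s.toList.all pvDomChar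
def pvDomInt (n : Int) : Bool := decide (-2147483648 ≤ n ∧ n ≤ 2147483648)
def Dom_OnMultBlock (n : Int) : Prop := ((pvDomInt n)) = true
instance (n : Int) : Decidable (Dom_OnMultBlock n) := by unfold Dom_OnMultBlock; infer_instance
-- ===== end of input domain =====

-- B replaces A's triple-loop multiplication (all-ones matrix times the per-row-constant matrix)
-- by the closed form: every cell is the sum of the first n positive integers; B fills a constant matrix.

-- ===== PORT A =====
-- [x]*n for a possibly nonpositive n is the empty list, exactly List.replicate n.toNat x.
-- All indices i, k, j come from range(0, n) and both matrices have n rows of n columns, so every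
-- pyGetD/pySetD access is in range; the defaults [] and 0 are never used.
def OnMultBlock (n : Int) : List (List Int) :=
  let t := (PySem.List.pyRange 0 n 1).foldl
    (fun (st : List (List Int) × List (List Int) × List (List Int)) i =>
      (st.1 ++ [List.replicate n.toNat (1 : Int)],
       st.2.1 ++ [List.replicate n.toNat (i + 1)],
       st.2.2 ++ [List.replicate n.toNat (0 : Int)]))
    ([], [], [])
  let m1 := t.1
  let m2 := t.2.1
  let res0 := t.2.2
  (PySem.List.pyRange 0 n 1).foldl (fun res i =>
    (PySem.List.pyRange 0 n 1).foldl (fun res k =>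
      (PySem.List.pyRange 0 n 1).foldl (fun res j =>
        PySem.List.pySetD res i
          (PySem.List.pySetD (PySem.List.pyGetD res i []) j
            (PySem.List.pyGetD (PySem.List.pyGetD res i []) j 0 +
             PySem.List.pyGetD (PySem.List.pyGetD m1 i []) k 0 *
             PySem.List.pyGetD (PySem.List.pyGetD m2 k []) j 0)))
        res) res) res0

-- ===== PORT B =====
def OnMultBlock_alt (n : Int) : List (List Int) :=
  let s := PySem.Int.floordiv (n * (n + 1)) 2
  (PySem.List.pyRange 0 n 1).map (fun _ => List.replicate n.toNat s)

-- ===== PRECONDITION & SPEC =====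
def Spec_OnMultBlock (n : Int) (out : List (List Int)) : Prop := out = OnMultBlock_alt n
instance (n : Int) (out : List (List Int)) : Decidable (Spec_OnMultBlock n out) := by unfold Spec_OnMultBlock; infer_instance

-- ===== CLAIM (what is proved, stated in full; the proofs are below) =====
def Claim_equal_OnMultBlock : Prop := ∀ (n : Int), Dom_OnMultBlock n → Spec_OnMultBlock n (OnMultBlock n)

-- ===== LEMMAS AND PROOFS =====

-- 1 + 2 + ... + m
def pvS : Nat → Int
  | 0 => 0
  | m + 1 => pvS m + ((m : Int) + 1)

theorem pvS_double (m : Nat) : 2 * pvS m = (m : Int) * ((m : Int) + 1) := by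
  induction m with
  | zero => simp [pvS]
  | succ m ih => simp only [pvS]; push_cast; ring_nf; ring_nf at ih; omega

theorem pvS_eq_floordiv (m : Nat) :
    pvS m = PySem.Int.floordiv ((m : Int) * ((m : Int) + 1)) 2 := by
  rw [PySem.Int.floordiv_eq_ediv_of_pos (by norm_num)]
  have h := pvS_double m
  omega

-- the first loop: three parallel list builds by append
theorem pv_build {α : Type} (l : List α) (f1 f2 f3 : α → List Int)
    (a b c : List (List Int)) :
    l.foldl (fun (st : List (List Int) × List (List Int) × List (List Int)) i =>
        (st.1 ++ [f1 i], st.2.1 ++ [f2 i], st.2.2 ++ [f3 i])) (a, b, c)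
      = (a ++ l.map f1, b ++ l.map f2, c ++ l.map f3) := by
  induction l generalizing a b c with
  | nil => simp
  | cons x t ih => simp [ih]

-- a fold whose step only rewrites row i acts on that row alone
theorem pv_localize {α : Type} (l : List α) (i : Nat) (f : List Int → α → List Int)
    (res : List (List Int)) (hi : i < res.length) :
    l.foldl (fun r j => r.set i (f (r.getD i []) j)) res
      = res.set i (l.foldl f (res.getD i [])) := by
  induction l generalizing res with
  | nil =>
    rw [List.foldl_nil, List.foldl_nil, List.getD_eq_getElem res [] hi,
      List.set_getElem_self hi]
  | cons x t ih =>
    rw [List.foldl_cons, List.foldl_cons,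
      ih _ (by simpa using hi),
      List.getD_eq_getElem res [] hi,
      List.getD_eq_getElem (res.set i _) [] (by simpa using hi)]
    simp [List.set_set]

-- the innermost loop on a constant row: every entry gets its increment
theorem pv_rowfold (N : Nat) (c : Nat → Int) (v : Int) :
    ∀ m, m ≤ N →
      (List.range m).foldl (fun r j => r.set j (r.getD j 0 + c j)) (List.replicate N v)
        = ((List.range m).map (fun j => v + c j)) ++ List.replicate (N - m) v := by
  intro m
  induction m with
  | zero => simp
  | succ m ih =>
    intro hm
    rw [List.range_succ, List.foldl_append, ih (by omega), List.foldl_cons, List.foldl_nil]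
    have hrep : N - m = (N - (m + 1)) + 1 := by omega
    have hget :
        (((List.range m).map (fun j => v + c j)) ++ List.replicate (N - m) v).getD m 0 = v := by
      rw [List.getD_eq_getElem _ 0 (by simp; omega)]
      rw [List.getElem_append_right (by simp)]
      simp
    rw [hget, List.set_append]
    simp [hrep, List.replicate_succ]

-- the middle loop: row i goes from the constant row v to the constant row v + pvS m
theorem pv_kfold (N i : Nat) (hiN : i < N) (g : Nat → Nat → Nat → Int)
    (hg : ∀ i' k j : Nat, i' < N → k < N → j < N → g i' k j = (k : Int) + 1)
    (res : List (List Int)) (hlen : res.length = N) (v : Int)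
    (hrow : res.getD i [] = List.replicate N v) :
    ∀ m, m ≤ N →
      (List.range m).foldl (fun res k =>
          (List.range N).foldl (fun res j =>
              res.set i ((res.getD i []).set j ((res.getD i []).getD j 0 + g i k j))) res)
        res
      = res.set i (List.replicate N (v + pvS m)) := by
  have hi : i < res.length := by omega
  intro m
  induction m with
  | zero =>
    intro _
    rw [List.range_zero, List.foldl_nil, pvS, add_zero, ← hrow, List.getD_eq_getElem res [] hi,
      List.set_getElem_self hi]
  | succ m ih =>
    intro hm
    rw [List.range_succ, List.foldl_append, ih (by omega), List.foldl_cons, List.foldl_nil]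
    rw [pv_localize (List.range N) i
      (fun r j => r.set j (r.getD j 0 + g i m j)) _ (by simpa using hi)]
    have hget : ((res.set i (List.replicate N (v + pvS m))).getD i []) =
        List.replicate N (v + pvS m) := by
      rw [List.getD_eq_getElem _ [] (by simpa using hi)]
      simp
    rw [hget, pv_rowfold N (fun j => g i m j) (v + pvS m) N le_rfl]
    have hmap : (List.range N).map (fun j => v + pvS m + g i m j)
        = List.replicate N (v + pvS (m + 1)) := by
      rw [show (List.replicate N (v + pvS (m + 1)))
          = (List.range N).map (fun _ => v + pvS (m + 1)) by simp [List.map_const']]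
      apply List.map_congr_left
      intro j hj
      rw [hg i m j hiN (by omega) (by simpa using hj), pvS]
      ring
    rw [hmap]
    simp [List.set_set]

-- the outer loop: rows 0..m-1 become the constant row pvS N, the rest stay zero
theorem pv_ifold (N : Nat) (g : Nat → Nat → Nat → Int)
    (hg : ∀ i k j : Nat, i < N → k < N → j < N → g i k j = (k : Int) + 1) :
    ∀ m, m ≤ N →
      (List.range m).foldl (fun res i =>
          (List.range N).foldl (fun res k =>
              (List.range N).foldl (fun res j =>
                  res.set i ((res.getD i []).set j ((res.getD i []).getD j 0 + g i k j))) res)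
            res)
        (List.replicate N (List.replicate N (0 : Int)))
      = List.replicate m (List.replicate N (pvS N))
          ++ List.replicate (N - m) (List.replicate N (0 : Int)) := by
  intro m
  induction m with
  | zero => simp
  | succ m ih =>
    intro hm
    rw [List.range_succ, List.foldl_append, ih (by omega), List.foldl_cons, List.foldl_nil]
    have hlen : (List.replicate m (List.replicate N (pvS N))
        ++ List.replicate (N - m) (List.replicate N (0 : Int))).length = N := by
      simp; omega
    have hrow : (List.replicate m (List.replicate N (pvS N))
        ++ List.replicate (N - m) (List.replicate N (0 : Int))).getD m []
        = List.replicate N (0 : Int) := by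
      rw [List.getD_eq_getElem _ [] (by omega)]
      rw [List.getElem_append_right (by simp)]
      simp
    rw [pv_kfold N m (by omega) g hg _ hlen 0 hrow N le_rfl]
    rw [List.set_append]
    simp only [List.length_replicate, lt_irrefl, Nat.sub_self]
    have hrep : N - m = (N - (m + 1)) + 1 := by omega
    rw [hrep, List.replicate_succ, List.set_cons_zero, List.replicate_succ' (n := m)]
    simp

-- ===== VERDICT (by name: the statement is the Claim_ definition above) =====
theorem OnMultBlock_spec : Claim_equal_OnMultBlock := by
  intro n _
  unfold Spec_OnMultBlock OnMultBlock OnMultBlock_alt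
  rcases (by omega : n ≤ 0 ∨ 0 < n) with hn | hn
  · rw [PySem.List.pyRange_one_eq_nil hn]
    simp
  · lift n to ℕ using le_of_lt hn with N
    rw [PySem.List.pyRange_zero_nat]
    simp only [List.foldl_map, List.map_map, Function.comp_def, Int.toNat_natCast,
      PySem.List.pyGetD_natCast, PySem.List.pySetD_natCast]
    rw [pv_build]
    simp only [List.nil_append]
    have hres0 : (List.range N).map (fun _ : Nat => List.replicate N (0 : Int))
        = List.replicate N (List.replicate N (0 : Int)) := by
      simp [List.map_const']
    have hB : (List.range N).map
        (fun _ : Nat => List.replicate N (PySem.Int.floordiv ((N : Int) * ((N : Int) + 1)) 2))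
        = List.replicate N (List.replicate N (pvS N)) := by
      rw [pvS_eq_floordiv]
      simp [List.map_const']
    rw [hres0, hB]
    have hg : ∀ i k j : Nat, i < N → k < N → j < N →
        ((List.map (fun _ : Nat => List.replicate N (1 : Int)) (List.range N)).getD i []).getD k 0 *
        ((List.map (fun y : Nat => List.replicate N ((y : Int) + 1)) (List.range N)).getD k []).getD j 0
          = (k : Int) + 1 := by
      intro i k j hi hk hj
      rw [List.getD_eq_getElem _ [] (by simpa using hi),
        List.getD_eq_getElem _ [] (by simpa using hk)]
      simp [hk, hj]
    have h := pv_ifold N _ hg N le_rfl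
    simpa using h
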